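-- pv_equiv track=rewrite | github.com/AshtonVaughan/bountyhound | bountyhound/engine/bypass/waf_adaptive.py | _whitespace_substitute
-- ===== SOURCE A (Python) =====
-- def _whitespace_substitute(payload: str) -> str:
--     """Replace spaces with alternative whitespace characters."""
--     alternatives = ["%09", "%0a", "%0d", "%0c", "/**/", "+"]
--     result = payload
--     idx = 0
--     parts = result.split(" ")
--     out = []
--     for i, part in enumerate(parts):
--         if i > 0:
--             out.append(alternatives[idx % len(alternatives)])
--             idx += 1
--         out.append(part)
--     return "".join(out)
-- ===== SOURCE B (Python) =====
-- def _whitespace_substitute(payload: str) -> str: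
--     """Replace spaces with alternative whitespace characters (one-pass char scan)."""
--     alternatives = ["%09", "%0a", "%0d", "%0c", "/**/", "+"]
--     out = []
--     counter = 0
--     for ch in payload:
--         if ch == ' ':
--             out.append(alternatives[counter % len(alternatives)])
--             counter += 1
--         else:
--             out.append(ch)
--     return ''.join(out)
-- ===== Notes on version B (the rewrite author's own statement) =====
-- stated objective: simpler
-- what changed: Replaces the split-on-space / enumerate / interleave pipeline with a single character-by-character scan that emits the next cycling token at each space.
import Mathlib
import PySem

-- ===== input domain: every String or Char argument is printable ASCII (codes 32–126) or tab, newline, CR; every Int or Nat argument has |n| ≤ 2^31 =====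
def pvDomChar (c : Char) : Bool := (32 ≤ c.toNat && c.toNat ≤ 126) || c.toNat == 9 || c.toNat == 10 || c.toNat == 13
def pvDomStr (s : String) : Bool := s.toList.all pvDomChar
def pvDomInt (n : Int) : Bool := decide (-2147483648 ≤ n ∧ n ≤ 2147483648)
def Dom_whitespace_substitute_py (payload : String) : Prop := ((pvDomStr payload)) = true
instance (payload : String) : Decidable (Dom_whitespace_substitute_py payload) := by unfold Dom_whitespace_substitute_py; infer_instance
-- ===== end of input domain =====

-- B replaces A's split-on-space / enumerate / interleave pipeline by a single
-- character scan with a counter; objective: simpler.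

-- The cycling alternative tokens (shared constant of both Pythons)
def wsAlts : List (List Char) :=
  ["%09".toList, "%0a".toList, "%0d".toList, "%0c".toList, "/**/".toList, "+".toList]

-- ===== PORT A =====
-- literal port of A: split on " ", then fold over the enumerated parts,
-- emitting alternatives[idx % len(alternatives)] before every part but the first
def whitespace_substitute_py (payload : String) : String :=
  let parts := PySem.Chars.splitOn payload.toList [' ']
  let res := (PySem.List.enumerate parts 0).foldl
    (fun (st : List (List Char) × Nat) p =>
      let out := st.1
      let idx := st.2
      let st' := if p.1 > 0 then
          (out ++ [wsAlts.getD (idx % wsAlts.length) []], idx + 1)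
        else (out, idx)
      (st'.1 ++ [p.2], st'.2)) ([], 0)
  String.ofList (PySem.Chars.join [] res.1)

-- ===== PORT B =====
-- literal port of B: one pass over the characters with a counter
def wsGo : List Char → Nat → List Char
  | [], _ => []
  | c :: cs, k =>
    if c = ' ' then wsAlts.getD (k % wsAlts.length) [] ++ wsGo cs (k + 1)
    else c :: wsGo cs k

def whitespace_substitute_py_alt (payload : String) : String :=
  String.ofList (wsGo payload.toList 0)

-- ===== PRECONDITION & SPEC =====
def Spec_whitespace_substitute_py (payload : String) (out : String) : Prop := out = whitespace_substitute_py_alt payload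
instance (payload : String) (out : String) : Decidable (Spec_whitespace_substitute_py payload out) := by unfold Spec_whitespace_substitute_py; infer_instance

-- ===== CLAIM (what is proved, stated in full; the proofs are below) =====
def Claim_equal_whitespace_substitute_py : Prop := ∀ (payload : String), Dom_whitespace_substitute_py payload → Spec_whitespace_substitute_py payload (whitespace_substitute_py payload)

-- ===== LEMMAS AND PROOFS =====

-- apply f to the head of a list, keep the tail
def mapHead (f : List Char → List Char) : List (List Char) → List (List Char)
  | [] => []
  | x :: xs => f x :: xs

-- simple structural recursion computing split on a single space character
def splitSp : List Char → List (List Char)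
  | [] => [[]]
  | c :: cs => if c = ' ' then [] :: splitSp cs else mapHead (c :: ·) (splitSp cs)

lemma mapHead_mapHead (f g : List Char → List Char) (xs : List (List Char)) :
    mapHead f (mapHead g xs) = mapHead (fun x => f (g x)) xs := by
  cases xs <;> simp [mapHead]

lemma mapHead_id' (xs : List (List Char)) : mapHead (fun x => x) xs = xs := by
  cases xs <;> simp [mapHead]

lemma splitSp_ne_nil (cs : List Char) : splitSp cs ≠ [] := by
  induction cs with
  | nil => simp [splitSp]
  | cons c cs ih =>
    simp only [splitSp]
    split
    · simp
    · cases h : splitSp cs with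
      | nil => exact absurd h ih
      | cons p ps => simp [mapHead]

lemma go_eq (cs : List Char) : ∀ (fuel : Nat), cs.length ≤ fuel →
    ∀ (cur : List Char) (acc : List (List Char)),
      PySem.Chars.splitOn.go [' '] fuel cs cur acc
        = acc.reverse ++ mapHead (cur.reverse ++ ·) (splitSp cs) := by
  induction cs with
  | nil =>
    intro fuel _ cur acc
    cases fuel <;> simp [PySem.Chars.splitOn.go, splitSp, mapHead]
  | cons c cs ih =>
    intro fuel hf cur acc
    cases fuel with
    | zero => simp at hf
    | succ f =>
      by_cases hc : c = ' '
      · subst hc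
        have hpre : [' '].isPrefixOf (' ' :: cs) = true := by simp [List.isPrefixOf]
        simp only [PySem.Chars.splitOn.go, hpre, if_pos, List.drop_succ_cons, List.drop_zero,
          List.length_singleton]
        rw [ih f (by simpa using hf) [] (cur.reverse :: acc)]
        cases hsp : splitSp cs <;> simp [splitSp, mapHead, hsp]
      · have hpre : [' '].isPrefixOf (c :: cs) = false := by
          simp [List.isPrefixOf]; exact fun h => hc h.symm
        simp only [PySem.Chars.splitOn.go, hpre, Bool.false_eq_true, if_false]
        rw [ih f (by simpa using hf) (c :: cur) acc]
        simp only [splitSp, hc, if_false, mapHead_mapHead]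
        congr 1
        cases h : splitSp cs with
        | nil => exact absurd h (splitSp_ne_nil cs)
        | cons p ps => simp [mapHead]

lemma splitOn_eq_splitSp (cs : List Char) :
    PySem.Chars.splitOn cs [' '] = splitSp cs := by
  unfold PySem.Chars.splitOn
  rw [go_eq cs (cs.length + 1) (by omega) [] []]
  simp only [List.reverse_nil, List.nil_append]
  exact mapHead_id' _

-- the B-side scan, expressed on the tail parts: token, part, token, part, …
def interA : List (List Char) → Nat → List Char
  | [], _ => []
  | q :: qs, k => wsAlts.getD (k % wsAlts.length) [] ++ q ++ interA qs (k + 1)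

lemma wsGo_eq_splitSp (cs : List Char) : ∀ (k : Nat),
    wsGo cs k = (splitSp cs).headD [] ++ interA (splitSp cs).tail k := by
  induction cs with
  | nil => intro k; simp [wsGo, splitSp, interA]
  | cons c cs ih =>
    intro k
    by_cases hc : c = ' '
    · subst hc
      simp only [wsGo, splitSp]
      rw [ih (k + 1)]
      cases h : splitSp cs with
      | nil => exact absurd h (splitSp_ne_nil cs)
      | cons p ps => simp [interA]
    · simp only [wsGo, hc, if_false, splitSp]
      rw [ih k]
      cases h : splitSp cs with
      | nil => exact absurd h (splitSp_ne_nil cs)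
      | cons p ps => simp [mapHead]

-- characterisation of A's fold over the enumerated tail (all indices ≥ 1)
def interListA : List (List Char) → Nat → List (List Char)
  | [], _ => []
  | q :: qs, k => wsAlts.getD (k % wsAlts.length) [] :: q :: interListA qs (k + 1)

lemma foldA_tail (qs : List (List Char)) : ∀ (s : Int), 1 ≤ s →
    ∀ (out : List (List Char)) (idx : Nat),
    (PySem.List.enumerate qs s).foldl
      (fun (st : List (List Char) × Nat) p =>
        ((if p.1 > 0 then (st.1 ++ [wsAlts.getD (st.2 % wsAlts.length) []], st.2 + 1)
          else (st.1, st.2)).1 ++ [p.2],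
         (if p.1 > 0 then (st.1 ++ [wsAlts.getD (st.2 % wsAlts.length) []], st.2 + 1)
          else (st.1, st.2)).2)) (out, idx)
      = (out ++ interListA qs idx, idx + qs.length) := by
  induction qs with
  | nil => intro s _ out idx; simp [PySem.List.enumerate, interListA]
  | cons q qs ih =>
    intro s hs out idx
    have henum : PySem.List.enumerate (q :: qs) s = (s, q) :: PySem.List.enumerate qs (s + 1) := rfl
    rw [henum, List.foldl_cons]
    have hpos : s > 0 := hs
    simp only [hpos, if_pos]
    rw [ih (s + 1) (by omega) _ (idx + 1)]
    simp [interListA]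
    omega

lemma intersperse_nil_flatten : ∀ (xs : List (List Char)),
    (List.intersperse ([] : List Char) xs).flatten = xs.flatten
  | [] => rfl
  | [x] => rfl
  | x :: y :: xs => by
    have : List.intersperse ([] : List Char) (x :: y :: xs)
        = x :: [] :: List.intersperse [] (y :: xs) := by
      simp [List.intersperse]
    simp [this, intersperse_nil_flatten (y :: xs)]

lemma flatten_interListA (qs : List (List Char)) : ∀ (k : Nat),
    (interListA qs k).flatten = interA qs k := by
  induction qs with
  | nil => intro k; simp [interListA, interA]
  | cons q qs ih => intro k; simp [interListA, interA, ih]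

-- ===== VERDICT (by name: the statement is the Claim_ definition above) =====
theorem whitespace_substitute_py_spec : Claim_equal_whitespace_substitute_py := by
  intro payload _
  show whitespace_substitute_py payload = whitespace_substitute_py_alt payload
  unfold whitespace_substitute_py whitespace_substitute_py_alt
  rw [splitOn_eq_splitSp]
  cases h : splitSp payload.toList with
  | nil => exact absurd h (splitSp_ne_nil payload.toList)
  | cons p ps =>
    have henum : PySem.List.enumerate (p :: ps) 0 = (0, p) :: PySem.List.enumerate ps 1 := rfl
    dsimp only
    rw [henum, List.foldl_cons]
    rw [show ((if (0:Int) > 0 then (([]:List (List Char)) ++ [wsAlts.getD (0 % wsAlts.length) []], (0:Nat) + 1) else ([], 0)).1 ++ [p],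
        (if (0:Int) > 0 then (([]:List (List Char)) ++ [wsAlts.getD (0 % wsAlts.length) []], (0:Nat) + 1) else ([], 0)).2)
        = (([p] : List (List Char)), (0:Nat)) by norm_num]
    rw [foldA_tail ps 1 (by omega) [p] 0]
    rw [wsGo_eq_splitSp payload.toList 0, h]
    simp only [PySem.Chars.join, List.intercalate, intersperse_nil_flatten]
    simp [flatten_interListA]
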